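-- pv_equiv track=rewrite | github.com/shunita/tedibert | contra/tests/bert_on_diags_base.py | code_list_to_text_list
-- ===== SOURCE A (Python) =====
-- def code_list_to_text_list(codes_list, lookup_dict):
--     '''This will also work on drugs - without a lookup dict'''
--     indexes = []
--     texts = []
--     index = 0
--     max_len = 0
--     for codes in codes_list:
--         if len(codes) == 0:
--             indexes.append((-1, -1))
--             continue
--         # sample is a list of sentences
--         if lookup_dict is not None:
--             titles = [lookup_dict[d] for d in codes if d in lookup_dict]
--         else:
--             titles = codes
--         indexes.append((index, index + len(titles)))
--         index += len(titles)
--         texts.extend(titles)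
--         if max_len < len(titles):
--             max_len = len(titles)
--     return indexes, texts, max_len
-- ===== SOURCE B (Python) =====
-- def code_list_to_text_list(codes_list, lookup_dict):
--     '''This will also work on drugs - without a lookup dict'''
--     # Pass 1: map each sample to its title list (None marks empty codes).
--     title_lists = []
--     for codes in codes_list:
--         if not codes:
--             title_lists.append(None)
--         elif lookup_dict is None:
--             title_lists.append(codes)
--         else:
--             title_lists.append([lookup_dict[d] for d in codes if d in lookup_dict])
--     # Pass 2: index ranges from a running offset.
--     indexes = []
--     index = 0
--     for t in title_lists:
--         if t is None:
--             indexes.append((-1, -1))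
--         else:
--             indexes.append((index, index + len(t)))
--             index += len(t)
--     # Pass 3: flatten.
--     texts = [x for t in title_lists if t is not None for x in t]
--     # Pass 4: maximum title-list length.
--     max_len = 0
--     for t in title_lists:
--         if t is not None:
--             max_len = max(max_len, len(t))
--     return indexes, texts, max_len
-- ===== Notes on version B (the rewrite author's own statement) =====
-- stated objective: alternative
-- what changed: B replaces A's single fused loop (which threads indexes, texts, running offset and max through one accumulator) with a map to an intermediate per-sample title-list (None sentinel for empty codes) followed by separate passes deriving each of the three outputs independently.
import Mathlib
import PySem

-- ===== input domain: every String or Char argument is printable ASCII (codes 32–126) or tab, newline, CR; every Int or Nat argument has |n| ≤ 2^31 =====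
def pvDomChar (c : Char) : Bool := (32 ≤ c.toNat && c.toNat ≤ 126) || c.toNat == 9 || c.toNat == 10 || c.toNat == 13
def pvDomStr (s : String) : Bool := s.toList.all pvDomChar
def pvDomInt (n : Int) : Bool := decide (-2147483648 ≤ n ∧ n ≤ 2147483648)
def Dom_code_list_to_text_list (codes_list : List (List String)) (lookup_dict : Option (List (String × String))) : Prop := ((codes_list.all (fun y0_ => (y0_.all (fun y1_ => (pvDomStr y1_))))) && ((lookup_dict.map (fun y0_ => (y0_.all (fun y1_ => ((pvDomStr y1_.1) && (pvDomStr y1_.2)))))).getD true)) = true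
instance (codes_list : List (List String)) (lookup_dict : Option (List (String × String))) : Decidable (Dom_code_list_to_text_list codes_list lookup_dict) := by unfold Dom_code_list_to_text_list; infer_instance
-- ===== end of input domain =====

-- B replaces A's single fused loop by a map to per-sample title lists (none for empty codes) plus separate passes per output (objective: alternative decomposition, same cost).

-- ===== PORT A =====
-- '[lookup_dict[d] for d in codes if d in lookup_dict]' : keep exactly the kept lookups, in order
def pvTitles (ld : Option (List (String × String))) (codes : List String) : List String :=
  match ld with
  | some dl => codes.filterMap (fun d => (PySem.Dict.mk dl).get? d)
  | none => codes

-- the for-loop of A, threading (indexes, texts, index, max_len)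
def pvALoop (ld : Option (List (String × String))) :
    List (List String) → List (Int × Int) → List String → Int → Int →
    (List (Int × Int)) × List String × Int
  | [], indexes, texts, _, max_len => (indexes, texts, max_len)
  | codes :: rest, indexes, texts, index, max_len =>
    if codes.length = 0 then
      pvALoop ld rest (indexes ++ [(-1, -1)]) texts index max_len
    else
      let titles := pvTitles ld codes
      pvALoop ld rest (indexes ++ [(index, index + titles.length)]) (texts ++ titles)
        (index + titles.length)
        (if max_len < (titles.length : Int) then (titles.length : Int) else max_len)

def code_list_to_text_list (codes_list : List (List String)) (lookup_dict : Option (List (String × String))) : (List (Int × Int)) × List String × Int :=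
  pvALoop lookup_dict codes_list [] [] 0 0

-- ===== PORT B =====
-- pass 1 of Source B: each sample's title list, none marking empty codes
def pvTitleLists (ld : Option (List (String × String))) (codes_list : List (List String)) :
    List (Option (List String)) :=
  codes_list.map (fun codes =>
    if codes.length = 0 then none
    else match ld with
      | none => some codes
      | some dl => some (codes.filterMap (fun d => (PySem.Dict.mk dl).get? d)))

-- pass 2 of Source B: index ranges from a running offset
def pvIdxLoop : List (Option (List String)) → Int → List (Int × Int)
  | [], _ => []
  | none :: rest, index => (-1, -1) :: pvIdxLoop rest index
  | some t :: rest, index =>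
    (index, index + t.length) :: pvIdxLoop rest (index + (t.length : Int))

def code_list_to_text_list_alt (codes_list : List (List String)) (lookup_dict : Option (List (String × String))) : (List (Int × Int)) × List String × Int :=
  let title_lists := pvTitleLists lookup_dict codes_list
  let indexes := pvIdxLoop title_lists 0
  let texts := title_lists.flatMap (fun t => t.getD [])            -- pass 3: flatten, skipping none
  let max_len := title_lists.foldl (fun m t =>                      -- pass 4: running max
      match t with | none => m | some l => max m (l.length : Int)) 0
  (indexes, texts, max_len)

-- ===== PRECONDITION & SPEC =====
def Spec_code_list_to_text_list (codes_list : List (List String)) (lookup_dict : Option (List (String × String))) (out : (List (Int × Int)) × List String × Int) : Prop := out = code_list_to_text_list_alt codes_list lookup_dict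
instance (codes_list : List (List String)) (lookup_dict : Option (List (String × String))) (out : (List (Int × Int)) × List String × Int) : Decidable (Spec_code_list_to_text_list codes_list lookup_dict out) := by unfold Spec_code_list_to_text_list; infer_instance

-- ===== CLAIM (what is proved, stated in full; the proofs are below) =====
def Claim_equal_code_list_to_text_list : Prop := ∀ (codes_list : List (List String)) (lookup_dict : Option (List (String × String))), Dom_code_list_to_text_list codes_list lookup_dict → Spec_code_list_to_text_list codes_list lookup_dict (code_list_to_text_list codes_list lookup_dict)

-- ===== LEMMAS AND PROOFS =====
lemma pvALoop_eq (ld : Option (List (String × String))) (rest : List (List String))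
    (indexes : List (Int × Int)) (texts : List String) (index max_len : Int) :
    pvALoop ld rest indexes texts index max_len =
      (indexes ++ pvIdxLoop (pvTitleLists ld rest) index,
       texts ++ (pvTitleLists ld rest).flatMap (fun t => t.getD []),
       (pvTitleLists ld rest).foldl (fun m t =>
         match t with | none => m | some l => max m (l.length : Int)) max_len) := by
  induction rest generalizing indexes texts index max_len with
  | nil => simp [pvALoop, pvTitleLists, pvIdxLoop]
  | cons codes rest ih =>
    by_cases h : codes.length = 0
    · have h' : codes = [] := List.length_eq_zero_iff.mp h
      subst h'
      simp [pvALoop, pvTitleLists, pvIdxLoop, ih]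
    · have hmax : (if max_len < ((pvTitles ld codes).length : Int)
          then ((pvTitles ld codes).length : Int) else max_len)
          = max max_len ((pvTitles ld codes).length : Int) := by
        split_ifs with h' <;> omega
      simp only [pvALoop, if_neg h]
      rw [ih, hmax]
      have hne : codes ≠ [] := by simpa using h
      cases ld <;> simp [pvTitleLists, pvIdxLoop, pvTitles, hne]

-- ===== VERDICT (by name: the statement is the Claim_ definition above) =====
theorem code_list_to_text_list_spec : Claim_equal_code_list_to_text_list := by
  intro codes_list lookup_dict _
  show _ = _
  unfold code_list_to_text_list code_list_to_text_list_alt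
  rw [pvALoop_eq]
  simp
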